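-- pv_equiv track=rewrite | github.com/liam-6C69616D/AdventOfCode25 | day1_python/part_2.py | zero_passes
-- ===== SOURCE A (Python) =====
-- def zero_passes(current_pos: int, rotate_by: int, clockwise: bool):
--     passes = 0
--     if clockwise:
--         while rotate_by > 0:
--             current_pos += 1
--             rotate_by -= 1
--             if current_pos % 100 == 0:
--                 passes += 1
--     else:
--         while rotate_by > 0:
--             current_pos -= 1
--             rotate_by -= 1
--             if current_pos % 100 == 0:
--                 passes += 1
--
--     return passes
-- ===== SOURCE B (Python) =====
-- def zero_passes(current_pos: int, rotate_by: int, clockwise: bool):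
--     if rotate_by <= 0:
--         return 0
--     if clockwise:
--         # multiples of 100 in (current_pos, current_pos + rotate_by]
--         return (current_pos + rotate_by) // 100 - current_pos // 100
--     # multiples of 100 in [current_pos - rotate_by, current_pos - 1]
--     return (current_pos - 1) // 100 - (current_pos - rotate_by - 1) // 100
-- ===== Notes on version B (the rewrite author's own statement) =====
-- stated objective: faster
-- what changed: Replaced the step-by-step rotation loop with a closed-form floor-division count of the multiples of 100 inside the swept interval.
import Mathlib
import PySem

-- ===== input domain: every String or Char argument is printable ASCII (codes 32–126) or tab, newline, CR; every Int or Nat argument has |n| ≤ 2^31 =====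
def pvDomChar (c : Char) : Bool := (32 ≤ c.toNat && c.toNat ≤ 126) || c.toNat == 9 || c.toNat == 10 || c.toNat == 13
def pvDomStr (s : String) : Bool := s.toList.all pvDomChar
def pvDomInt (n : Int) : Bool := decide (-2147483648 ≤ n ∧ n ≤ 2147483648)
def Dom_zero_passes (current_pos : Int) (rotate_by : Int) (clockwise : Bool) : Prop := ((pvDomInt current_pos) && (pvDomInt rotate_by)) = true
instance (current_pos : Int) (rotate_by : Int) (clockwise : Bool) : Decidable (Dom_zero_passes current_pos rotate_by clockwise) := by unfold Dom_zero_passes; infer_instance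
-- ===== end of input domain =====

-- B replaces A's step-by-step rotation loop with an O(1) floor-division count of multiples of 100 in the swept interval.

-- ===== PORT A =====
-- the clockwise while-loop of A, state (current_pos, rotate_by, passes)
def zp_loop_cw (current_pos rotate_by passes : Int) : Int :=
  if rotate_by > 0 then
    zp_loop_cw (current_pos + 1) (rotate_by - 1)
      (if PySem.Int.mod (current_pos + 1) 100 == 0 then passes + 1 else passes)
  else passes
termination_by rotate_by.toNat
decreasing_by omega

-- the counter-clockwise while-loop of A
def zp_loop_ccw (current_pos rotate_by passes : Int) : Int :=
  if rotate_by > 0 then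
    zp_loop_ccw (current_pos - 1) (rotate_by - 1)
      (if PySem.Int.mod (current_pos - 1) 100 == 0 then passes + 1 else passes)
  else passes
termination_by rotate_by.toNat
decreasing_by omega

def zero_passes (current_pos : Int) (rotate_by : Int) (clockwise : Bool) : Int :=
  if clockwise then zp_loop_cw current_pos rotate_by 0
  else zp_loop_ccw current_pos rotate_by 0

-- ===== PORT B =====
def zero_passes_alt (current_pos : Int) (rotate_by : Int) (clockwise : Bool) : Int :=
  if rotate_by ≤ 0 then 0
  else if clockwise then
    PySem.Int.floordiv (current_pos + rotate_by) 100 - PySem.Int.floordiv current_pos 100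
  else
    PySem.Int.floordiv (current_pos - 1) 100 - PySem.Int.floordiv (current_pos - rotate_by - 1) 100

-- ===== PRECONDITION & SPEC =====
def Spec_zero_passes (current_pos : Int) (rotate_by : Int) (clockwise : Bool) (out : Int) : Prop := out = zero_passes_alt current_pos rotate_by clockwise
instance (current_pos : Int) (rotate_by : Int) (clockwise : Bool) (out : Int) : Decidable (Spec_zero_passes current_pos rotate_by clockwise out) := by unfold Spec_zero_passes; infer_instance

-- ===== CLAIM (what is proved, stated in full; the proofs are below) =====
def Claim_equal_zero_passes : Prop := ∀ (current_pos : Int) (rotate_by : Int) (clockwise : Bool), Dom_zero_passes current_pos rotate_by clockwise → Spec_zero_passes current_pos rotate_by clockwise (zero_passes current_pos rotate_by clockwise)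

-- ===== LEMMAS AND PROOFS =====

theorem zp_loop_cw_closed (rotate_by current_pos passes : Int) (h : 0 < rotate_by) :
    zp_loop_cw current_pos rotate_by passes
      = passes + ((current_pos + rotate_by) / 100 - current_pos / 100) := by
  induction rotate_by, h using Int.le_induction generalizing current_pos passes with
  | base =>
      rw [zp_loop_cw, if_pos (by omega), zp_loop_cw, if_neg (by omega)]
      rw [PySem.Int.mod_eq_emod_of_pos (by norm_num : (0:Int) < 100)]
      simp only [beq_iff_eq]
      split_ifs with hm <;> omega
  | succ n hn ih =>
      rw [zp_loop_cw, if_pos (by omega)]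
      have hs : n + 1 - 1 = n := by ring
      rw [hs, ih]
      have ha : current_pos + 1 + n = current_pos + (n + 1) := by ring
      rw [ha, PySem.Int.mod_eq_emod_of_pos (by norm_num : (0:Int) < 100)]
      simp only [beq_iff_eq]
      split_ifs with hm <;> omega

theorem zp_loop_ccw_closed (rotate_by current_pos passes : Int) (h : 0 < rotate_by) :
    zp_loop_ccw current_pos rotate_by passes
      = passes + ((current_pos - 1) / 100 - (current_pos - rotate_by - 1) / 100) := by
  induction rotate_by, h using Int.le_induction generalizing current_pos passes with
  | base =>
      rw [zp_loop_ccw, if_pos (by omega), zp_loop_ccw, if_neg (by omega)]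
      rw [PySem.Int.mod_eq_emod_of_pos (by norm_num : (0:Int) < 100)]
      simp only [beq_iff_eq]
      split_ifs with hm <;> omega
  | succ n hn ih =>
      rw [zp_loop_ccw, if_pos (by omega)]
      have hs : n + 1 - 1 = n := by ring
      rw [hs, ih]
      have ha : current_pos - 1 - n - 1 = current_pos - (n + 1) - 1 := by ring
      rw [ha, PySem.Int.mod_eq_emod_of_pos (by norm_num : (0:Int) < 100)]
      simp only [beq_iff_eq]
      split_ifs with hm <;> omega

-- ===== VERDICT (by name: the statement is the Claim_ definition above) =====
theorem zero_passes_spec : Claim_equal_zero_passes := by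
  intro c r cw _
  unfold Spec_zero_passes zero_passes zero_passes_alt
  by_cases hr : r <= 0
  . rw [if_pos hr]
    cases cw <;> simp only [if_true, if_false, Bool.false_eq_true]
    . rw [zp_loop_ccw, if_neg (by omega)]
    . rw [zp_loop_cw, if_neg (by omega)]
  . rw [if_neg hr]
    cases cw <;> simp only [if_true, if_false, Bool.false_eq_true]
    . rw [zp_loop_ccw_closed _ _ _ (by omega),
          PySem.Int.floordiv_eq_ediv_of_pos (by norm_num : (0:Int) < 100),
          PySem.Int.floordiv_eq_ediv_of_pos (by norm_num : (0:Int) < 100)]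
      omega
    . rw [zp_loop_cw_closed _ _ _ (by omega),
          PySem.Int.floordiv_eq_ediv_of_pos (by norm_num : (0:Int) < 100),
          PySem.Int.floordiv_eq_ediv_of_pos (by norm_num : (0:Int) < 100)]
      omega
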